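-- pv_equiv track=rewrite | github.com/TimurKhairutdinov/Learning-Python | HomeWorks/Lesson003/Example002check_txt.py | check_text
-- ===== SOURCE A (Python) =====
-- def check_text(line, find):
--     count = -1
--     for i in range(len(line)):
--         if find == line[i]:
--             index = i
--             count += 1
--             if count == 1:
--                 return index
--     if count < 1:
--         return -1
-- ===== SOURCE B (Python) =====
-- def check_text(line, find):
--     if len(find) != 1:
--         return -1
--     return line.find(find, line.find(find) + 1)
-- ===== Notes on version B (the rewrite author's own statement) =====
-- stated objective: idiomatic
-- what changed: Replaces A's index loop threading a running count through an early exit with two standard-library substring searches: str.find locates the first occurrence and str.find with a start offset just past it locates the second; a one-line length guard keeps the single-character comparison semantics (a needle that is not exactly one character can never equal any line[i], so the answer is -1).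
import Mathlib
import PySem

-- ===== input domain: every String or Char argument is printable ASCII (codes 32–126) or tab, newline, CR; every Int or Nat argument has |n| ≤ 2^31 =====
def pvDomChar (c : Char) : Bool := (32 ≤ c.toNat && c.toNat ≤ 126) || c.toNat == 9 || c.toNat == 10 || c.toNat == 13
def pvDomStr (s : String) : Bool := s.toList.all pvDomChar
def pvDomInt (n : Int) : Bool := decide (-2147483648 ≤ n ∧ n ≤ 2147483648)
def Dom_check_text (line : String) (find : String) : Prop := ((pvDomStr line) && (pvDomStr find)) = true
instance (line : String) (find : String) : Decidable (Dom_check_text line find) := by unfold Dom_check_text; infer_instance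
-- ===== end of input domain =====

-- B replaces A's counting loop by two library substring searches: str.find for the first
-- occurrence, then str.find starting just past it for the second (objective: idiomatic; measured faster by the C-level search).
-- ===== PORT A =====
-- A's loop: for i in range(len(line)): if find == line[i]: count += 1; if count == 1: return index
def checkTextGo (find : String) (cs : List Char) (i : Int) (count : Int) : Int :=
  match cs with
  | [] => -1                     -- loop ends; count < 1 always holds here, so A returns -1
  | c :: rest =>
    if find == String.ofList [c] then
      (if count + 1 == 1 then i else checkTextGo find rest (i + 1) (count + 1))
    else checkTextGo find rest (i + 1) count

def check_text (line : String) (find : String) : Int :=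
  checkTextGo find line.toList 0 (-1)

-- ===== PORT B =====
def check_text_alt (line : String) (find : String) : Int :=
  if PySem.Str.len find ≠ 1 then -1
  else PySem.Str.findFrom line find (PySem.Str.find line find + 1) none

-- ===== PRECONDITION & SPEC =====
def Spec_check_text (line : String) (find : String) (out : Int) : Prop := out = check_text_alt line find
instance (line : String) (find : String) (out : Int) : Decidable (Spec_check_text line find out) := by unfold Spec_check_text; infer_instance

-- ===== CLAIM (what is proved, stated in full; the proofs are below) =====
def Claim_equal_check_text : Prop := ∀ (line : String) (find : String), Dom_check_text line find → Spec_check_text line find (check_text line find)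

-- ===== LEMMAS AND PROOFS =====

-- the predicate A tests at each position
def pvP (find : String) (c : Char) : Bool := find == String.ofList [c]

theorem pvP_iff (find : String) (c : Char) : pvP find c = true ↔ find.toList = [c] := by
  unfold pvP
  rw [beq_iff_eq]
  constructor
  · intro h; rw [h]; exact String.toList_ofList
  · intro h
    have : find.toList = (String.ofList [c]).toList := by
      rw [h, String.toList_ofList]
    exact String.toList_injective this

theorem go_all_false (find : String) (cs : List Char)
    (h : ∀ c ∈ cs, pvP find c = false) :
    ∀ i count, checkTextGo find cs i count = -1 := by
  induction cs with
  | nil => intro i count; rfl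
  | cons c rest ih =>
    intro i count
    have hc : pvP find c = false := h c (List.mem_cons_self ..)
    unfold checkTextGo
    rw [show (find == String.ofList [c]) = false from hc]
    simp only [Bool.false_eq_true, if_false]
    exact ih (fun x hx => h x (List.mem_cons_of_mem _ hx)) _ _

theorem go_zero (find : String) (cs : List Char) (i : Int) :
    checkTextGo find cs i 0 =
      match cs.findIdx? (pvP find) with
      | some n => i + n
      | none => -1 := by
  induction cs generalizing i with
  | nil => rfl
  | cons c rest ih =>
    rw [List.findIdx?_cons]
    by_cases h : pvP find c = true
    · simp [checkTextGo, pvP] at h ⊢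
      simp [h]
    · have h' : (find == String.ofList [c]) = false := by
        simpa [pvP] using h
      simp only [checkTextGo, h', Bool.false_eq_true, if_false]
      rw [ih]
      rw [show (pvP find c) = false from h']
      simp only [Bool.false_eq_true, if_false]
      cases hm : rest.findIdx? (pvP find) with
      | none => simp
      | some m => simp; ring

theorem go_neg (find : String) (cs : List Char) (i : Int) :
    checkTextGo find cs i (-1) =
      match cs.findIdx? (pvP find) with
      | none => -1
      | some n =>
        match (cs.drop (n+1)).findIdx? (pvP find) with
        | none => -1
        | some m => i + (n + 1 + m) := by
  induction cs generalizing i with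
  | nil => rfl
  | cons c rest ih =>
    rw [List.findIdx?_cons]
    by_cases h : pvP find c = true
    · have h' : (find == String.ofList [c]) = true := h
      simp only [checkTextGo, h', if_true]
      norm_num
      rw [go_zero]
      rw [show (pvP find c) = true from h]
      simp only [if_true, List.drop_zero]
      cases hm : rest.findIdx? (pvP find) with
      | none => simp
      | some m => simp; ring
    · have h' : (find == String.ofList [c]) = false := by
        simpa [pvP] using h
      simp only [checkTextGo, h', Bool.false_eq_true, if_false]
      rw [ih]
      rw [show (pvP find c) = false from h']
      simp only [Bool.false_eq_true, if_false]
      cases hm : rest.findIdx? (pvP find) with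
      | none => simp
      | some n =>
        simp only [Option.map_some]
        simp only [List.drop_succ_cons]
        cases hm2 : (rest.drop (n+1)).findIdx? (pvP find) with
        | none => simp
        | some m => simp; ring

-- [ch] is a prefix of l iff l starts with ch
theorem single_prefix_iff (ch : Char) (l : List Char) :
    [ch] <+: l ↔ l.head? = some ch := by
  cases l with
  | nil => simp
  | cons a t =>
    simp [List.cons_prefix_cons, eq_comm]

theorem single_prefix_drop_iff (ch : Char) (s : List Char) (k : Nat) :
    [ch] <+: s.drop k ↔ s[k]? = some ch := by
  rw [single_prefix_iff, List.head?_drop]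

theorem single_infix_iff (ch : Char) (s : List Char) :
    [ch] <:+: s ↔ ch ∈ s := by
  rw [← PySem.Chars.isIn_iff_infix, ← PySem.Chars.exists_prefix_drop_iff_isIn]
  constructor
  · rintro ⟨j, hj⟩
    rw [single_prefix_drop_iff] at hj
    exact List.mem_of_getElem? hj
  · intro h
    obtain ⟨k, hk⟩ := List.mem_iff_getElem?.mp h
    exact ⟨k, (single_prefix_drop_iff ch s k).mpr hk⟩

-- find on a single-character needle is the first index of that character
theorem find_single (ch : Char) (s : List Char) :
    PySem.Chars.find s [ch] =
      match s.findIdx? (· == ch) with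
      | some n => (n : Int)
      | none => -1 := by
  cases hidx : s.findIdx? (· == ch) with
  | none =>
    have hnm : ch ∉ s := by
      intro hm
      have := List.findIdx?_eq_none_iff.mp hidx
      have := this ch hm
      simp at this
    rw [PySem.Chars.find_eq_neg_one_iff]
    rw [single_infix_iff]
    exact hnm
  | some n =>
    have hlt : n < s.length := (List.findIdx?_eq_some_iff_findIdx_eq.mp hidx).1
    have hp : s[n]? = some ch := by
      have := List.findIdx?_eq_some_iff_getElem.mp hidx
      obtain ⟨h1, hpn, _⟩ := this
      simp [List.getElem?_eq_getElem h1]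
      simpa using hpn
    have hmin : ∀ m < n, ¬ ([ch] <+: s.drop m) := by
      intro m hmn hpre
      rw [single_prefix_drop_iff] at hpre
      obtain ⟨h1, _, hlt'⟩ := List.findIdx?_eq_some_iff_getElem.mp hidx
      have := hlt' m hmn
      have hm : m < s.length := lt_trans hmn h1
      rw [List.getElem?_eq_getElem hm] at hpre
      simp at hpre
      simp [hpre] at this
    have hmem : ch ∈ s := by
      have := List.getElem?_eq_some_iff.mp hp
      obtain ⟨h1, h2⟩ := this
      exact h2 ▸ List.getElem_mem h1
    have hnn : 0 ≤ PySem.Chars.find s [ch] := by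
      rw [PySem.Chars.find_nonneg_iff, single_infix_iff]; exact hmem
    obtain ⟨hpre, hspec⟩ := PySem.Chars.find_spec (s := s) (sub := [ch]) hnn
    have h1 : n ≤ (PySem.Chars.find s [ch]).toNat := by
      by_contra hc
      exact hmin _ (by omega) hpre
    have h2 : ¬ (n < (PySem.Chars.find s [ch]).toNat) := by
      intro hc
      exact hspec n hc ((single_prefix_drop_iff ch s n).mpr hp)
    show PySem.Chars.find s [ch] = (n : Int)
    omega

theorem check_text_spec : Claim_equal_check_text := by
  intro line find _
  unfold Spec_check_text check_text check_text_alt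
  by_cases hlen : find.toList.length = 1
  · obtain ⟨ch, hch⟩ : ∃ ch, find.toList = [ch] := by
      cases h : find.toList with
      | nil => simp [h] at hlen
      | cons a t => cases t with
        | nil => exact ⟨a, rfl⟩
        | cons b u => simp [h] at hlen
    have hps : ∀ c, pvP find c = ((c == ch) : Bool) := by
      intro c
      by_cases hc : c = ch
      · subst hc
        simp [pvP_iff, hch]
      · have : pvP find c = false := by
          rw [Bool.eq_false_iff]
          intro hcontra
          rw [pvP_iff] at hcontra
          rw [hch] at hcontra
          simp at hcontra
          exact hc hcontra.symm
        simp [this, hc]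
    have hfun : pvP find = (· == ch) := funext hps
    rw [if_neg (by simp [PySem.Str.len_eq, -String.length_toList, hlen])]
    rw [go_neg, hfun]
    simp only [PySem.Str.findFrom_eq, PySem.Str.find_eq, hch]
    rw [find_single]
    cases hidx : line.toList.findIdx? (· == ch) with
    | none =>
      simp only []
      rw [show (-1 : Int) + 1 = 0 from by norm_num]
      rw [PySem.Chars.findFrom_zero, find_single, hidx]
    | some n =>
      simp only []
      have hlt : n < line.toList.length := (List.findIdx?_eq_some_iff_findIdx_eq.mp hidx).1
      have hcast : ((n : Int) + 1) = ((n + 1 : Nat) : Int) := by push_cast; ring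
      rw [hcast, PySem.Chars.findFrom_natCast _ _ _ (by omega)]
      rw [find_single]
      cases hidx2 : (line.toList.drop (n+1)).findIdx? (· == ch) with
      | none => simp
      | some m =>
        have : ((m : Int)) ≠ -1 := by omega
        simp only [this, if_false]
        push_cast
        ring
  · rw [if_pos (by simp [PySem.Str.len_eq, -String.length_toList, hlen])]
    apply go_all_false
    intro c hc
    rw [Bool.eq_false_iff]
    intro h
    rw [pvP_iff] at h
    simp [h] at hlen
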